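-- pv_equiv track=rewrite | github.com/ArielleFox/yubiCrypt | yubiCryptImporter/modules/get_ids.py | compare_and_merge_data
-- ===== SOURCE A (Python) =====
-- def compare_and_merge_data(new_data, existing_data):
--     """Compare and merge new data with existing data"""
--     merged_data = existing_data.copy()
--     changes = False
--
--     for slot, identity in new_data.items():
--         if slot not in existing_data or existing_data[slot] != identity:
--             merged_data[slot] = identity
--             changes = True
--
--     return merged_data, changes
-- ===== SOURCE B (Python) =====
-- def compare_and_merge_data(new_data, existing_data):
--     """Compare and merge new data with existing data"""
--     merged_data = existing_data.copy()
--     merged_data.update(new_data)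
--     return merged_data, merged_data != existing_data
-- ===== Notes on version B (the rewrite author's own statement) =====
-- stated objective: simpler
-- what changed: Replaced A's per-key membership/compare loop with boolean accumulator by a bulk copy()+update() followed by a single whole-dict comparison to compute the changes flag.
import Mathlib
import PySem

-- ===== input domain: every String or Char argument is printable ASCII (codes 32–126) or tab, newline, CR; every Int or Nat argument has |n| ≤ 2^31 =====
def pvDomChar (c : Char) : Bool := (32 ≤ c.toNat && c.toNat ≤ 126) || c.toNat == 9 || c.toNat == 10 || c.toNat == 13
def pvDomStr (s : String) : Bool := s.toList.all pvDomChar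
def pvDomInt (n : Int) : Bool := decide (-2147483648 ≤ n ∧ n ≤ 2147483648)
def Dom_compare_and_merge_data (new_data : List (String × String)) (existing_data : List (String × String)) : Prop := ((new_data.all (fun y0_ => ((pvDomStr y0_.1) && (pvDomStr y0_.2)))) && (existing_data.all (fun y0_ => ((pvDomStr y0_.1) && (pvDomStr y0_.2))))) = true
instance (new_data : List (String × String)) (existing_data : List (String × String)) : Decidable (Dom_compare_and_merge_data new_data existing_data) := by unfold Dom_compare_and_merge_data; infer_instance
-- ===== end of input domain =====

-- B replaces A's per-key compare-and-set loop (with a boolean accumulator) by a bulk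
-- copy()+update() and a single whole-dict comparison for the changes flag (objective: simpler).

-- ===== PORT A =====
-- the dict arguments arrive as association lists; Dict.ofList rebuilds the Python dicts
def compare_and_merge_data (new_data : List (String × String)) (existing_data : List (String × String)) : (List (String × String)) × Bool :=
  let ed : PySem.Dict String String := PySem.Dict.ofList existing_data
  -- merged_data = existing_data.copy(); changes = False; for slot, identity in new_data.items(): …
  let st := (PySem.Dict.ofList new_data).items.foldl
    (fun (st : PySem.Dict String String × Bool) kv =>
      if ed.get? kv.1 ≠ some kv.2 then (st.1.insert kv.1 kv.2, true) else st)
    (ed, false)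
  (st.1.items, st.2)

-- ===== PORT B =====
-- Python's '==' on dicts compares the key→value mappings, ignoring insertion order
def pyDictEq (d e : PySem.Dict String String) : Bool :=
  d.keys.all (fun k => d.get? k == e.get? k) && e.keys.all (fun k => e.get? k == d.get? k)

def compare_and_merge_data_alt (new_data : List (String × String)) (existing_data : List (String × String)) : (List (String × String)) × Bool :=
  let ed : PySem.Dict String String := PySem.Dict.ofList existing_data
  -- merged_data = existing_data.copy(); merged_data.update(new_data)
  let merged := ed.update (PySem.Dict.ofList new_data).items
  -- return merged_data, merged_data != existing_data
  (merged.items, !(pyDictEq merged ed))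

-- ===== PRECONDITION & SPEC =====
def Spec_compare_and_merge_data (new_data : List (String × String)) (existing_data : List (String × String)) (out : (List (String × String)) × Bool) : Prop := out = compare_and_merge_data_alt new_data existing_data
instance (new_data : List (String × String)) (existing_data : List (String × String)) (out : (List (String × String)) × Bool) : Decidable (Spec_compare_and_merge_data new_data existing_data out) := by unfold Spec_compare_and_merge_data; infer_instance

-- ===== CLAIM (what is proved, stated in full; the proofs are below) =====
def Claim_equal_compare_and_merge_data : Prop := ∀ (new_data : List (String × String)) (existing_data : List (String × String)), Dom_compare_and_merge_data new_data existing_data → Spec_compare_and_merge_data new_data existing_data (compare_and_merge_data new_data existing_data)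

-- ===== LEMMAS AND PROOFS =====

-- inserting the value a key already has leaves the dict unchanged
theorem dict_insert_eq_self {κ ν : Type} [BEq κ] [LawfulBEq κ] (d : PySem.Dict κ ν) {k : κ} {v : ν}
    (hnd : d.keys.Nodup) (h : d.get? k = some v) : d.insert k v = d := by
  have hk : k ∈ d.keys := by
    by_contra hk
    rw [← PySem.Dict.get?_eq_none_iff_not_mem_keys] at hk
    rw [hk] at h; cases h
  have hc : d.contains k = true := (PySem.Dict.contains_iff_mem_keys d k).mpr hk
  apply PySem.Dict.ext
  rw [PySem.Dict.items_insert_of_contains d v hc]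
  conv_rhs => rw [← List.map_id d.items]
  apply List.map_congr_left
  intro p hp
  by_cases hpk : (p.1 == k) = true
  · have hek : p.1 = k := eq_of_beq hpk
    have hg : d.get? p.1 = some p.2 := PySem.Dict.get?_of_mem_items d (by simpa using hp) hnd
    rw [hek, h] at hg
    have hv : v = p.2 := Option.some.inj hg
    rw [hv, ← hek]
    simp
  · simp [hpk]

theorem dict_get?_update_of_not_mem {κ ν : Type} [BEq κ] [LawfulBEq κ] :
    ∀ (l : List (κ × ν)) (d : PySem.Dict κ ν) (k : κ), k ∉ l.map Prod.fst →
      (d.update l).get? k = d.get? k := by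
  intro l
  induction l with
  | nil => intro d k _; rfl
  | cons kv rest ih =>
    intro d k hk
    simp only [List.map_cons, List.mem_cons, not_or] at hk
    show ((d.insert kv.1 kv.2).update rest).get? k = d.get? k
    rw [ih _ _ hk.2, PySem.Dict.get?_insert_of_ne _ _ hk.1]

theorem dict_get?_update_mem {κ ν : Type} [BEq κ] [LawfulBEq κ] :
    ∀ (l : List (κ × ν)) (d : PySem.Dict κ ν) (kv : κ × ν), (l.map Prod.fst).Nodup → kv ∈ l →
      (d.update l).get? kv.1 = some kv.2 := by
  intro l
  induction l with
  | nil => intro _ _ _ h; cases h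
  | cons kv' rest ih =>
    intro d kv hnd hm
    have hnd' := hnd
    simp only [List.map_cons, List.nodup_cons] at hnd'
    rcases List.mem_cons.mp hm with h | h
    · subst h
      show ((d.insert kv.1 kv.2).update rest).get? kv.1 = some kv.2
      rw [dict_get?_update_of_not_mem rest _ _ hnd'.1, PySem.Dict.get?_insert_self]
    · exact ih _ _ hnd'.2 h

theorem dict_update_eq_self {κ ν : Type} [BEq κ] [LawfulBEq κ] :
    ∀ (l : List (κ × ν)) (d : PySem.Dict κ ν), d.keys.Nodup →
      (∀ kv ∈ l, d.get? kv.1 = some kv.2) → d.update l = d := by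
  intro l
  induction l with
  | nil => intro d _ _; rfl
  | cons kv rest ih =>
    intro d hnd hall
    show (d.insert kv.1 kv.2).update rest = d
    rw [dict_insert_eq_self d hnd (hall kv (List.mem_cons_self ..))]
    exact ih d hnd (fun kv' h => hall kv' (List.mem_cons_of_mem _ h))

-- characterises A's loop: merged ends as m.update l and the flag records any differing key
theorem loopA_eq (ed : PySem.Dict String String) :
    ∀ (l : List (String × String)) (m : PySem.Dict String String) (c : Bool),
      (l.map Prod.fst).Nodup → m.keys.Nodup →
      (∀ kv ∈ l, m.get? kv.1 = ed.get? kv.1) →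
      l.foldl (fun st kv => if ed.get? kv.1 ≠ some kv.2 then (st.1.insert kv.1 kv.2, true) else st) (m, c)
        = (m.update l, c || l.any (fun kv => !(ed.get? kv.1 == some kv.2))) := by
  intro l
  induction l with
  | nil => intro m c _ _ _; simp [PySem.Dict.update]
  | cons kv rest ih =>
    intro m c hnd hm hall
    simp only [List.map_cons, List.nodup_cons] at hnd
    simp only [List.foldl_cons, List.any_cons]
    by_cases h : ed.get? kv.1 = some kv.2
    · have hmk : m.get? kv.1 = some kv.2 := by rw [hall kv (List.mem_cons_self ..), h]
      have hins : m.insert kv.1 kv.2 = m := dict_insert_eq_self m hm hmk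
      rw [if_neg (by simp [h])]
      have hupd : m.update (kv :: rest) = m.update rest := by
        show (m.insert kv.1 kv.2).update rest = m.update rest
        rw [hins]
      rw [hupd, ih m c hnd.2 hm (fun kv' h' => hall kv' (List.mem_cons_of_mem _ h'))]
      simp [h]
    · rw [if_pos (by simp [h])]
      have hne : ∀ kv' ∈ rest, kv'.1 ≠ kv.1 := by
        intro kv' h' he
        exact hnd.1 (he ▸ List.mem_map_of_mem h')
      have := ih (m.insert kv.1 kv.2) true hnd.2 (PySem.Dict.nodup_keys_insert m kv.1 kv.2 hm)
        (fun kv' h' => by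
          rw [PySem.Dict.get?_insert_of_ne _ _ (hne kv' h')]
          exact hall kv' (List.mem_cons_of_mem _ h'))
      rw [this]
      have : (!(ed.get? kv.1 == some kv.2)) = true := by simp [h]
      rw [this]
      simp [PySem.Dict.update]

-- the any-differing-key flag equals Python's merged != existing comparison
theorem any_eq_not_pyDictEq (ed : PySem.Dict String String) (l : List (String × String))
    (hnd : (l.map Prod.fst).Nodup) (hed : ed.keys.Nodup) :
    l.any (fun kv => !(ed.get? kv.1 == some kv.2)) = !(pyDictEq (ed.update l) ed) := by
  cases hany : l.any (fun kv => !(ed.get? kv.1 == some kv.2)) with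
  | false =>
    have hall : ∀ kv ∈ l, ed.get? kv.1 = some kv.2 := by
      intro kv h
      have := List.any_eq_false.mp hany kv h
      simpa using this
    rw [dict_update_eq_self l ed hed hall]
    have : pyDictEq ed ed = true := by
      simp [pyDictEq, List.all_eq_true]
    rw [this]; rfl
  | true =>
    obtain ⟨kv, hm, hkv⟩ := List.any_eq_true.mp hany
    have hne : ed.get? kv.1 ≠ some kv.2 := by simpa using hkv
    have hmerged : (ed.update l).get? kv.1 = some kv.2 := dict_get?_update_mem l ed kv hnd hm
    have hkmem : kv.1 ∈ (ed.update l).keys := by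
      by_contra hk
      rw [← PySem.Dict.get?_eq_none_iff_not_mem_keys] at hk
      rw [hk] at hmerged; cases hmerged
    have hfail : ((ed.update l).get? kv.1 == ed.get? kv.1) = false := by
      rw [hmerged]
      exact beq_eq_false_iff_ne.mpr (fun he => hne he.symm)
    have : pyDictEq (ed.update l) ed = false := by
      unfold pyDictEq
      rw [Bool.and_eq_false_iff]
      left
      rw [List.all_eq_false]
      exact ⟨kv.1, hkmem, by simp [hfail]⟩
    rw [this]; rfl

-- ===== VERDICT (by name: the statement is the Claim_ definition above) =====
theorem compare_and_merge_data_spec : Claim_equal_compare_and_merge_data := by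
  intro new_data existing_data _
  unfold Spec_compare_and_merge_data
  simp only [compare_and_merge_data, compare_and_merge_data_alt]
  have hnd : ((PySem.Dict.ofList (κ := String) (ν := String) new_data).items.map Prod.fst).Nodup :=
    PySem.Dict.nodup_keys_ofList new_data
  have hed : (PySem.Dict.ofList (κ := String) (ν := String) existing_data).keys.Nodup :=
    PySem.Dict.nodup_keys_ofList existing_data
  rw [loopA_eq _ _ _ _ hnd hed (fun _ _ => rfl)]
  rw [any_eq_not_pyDictEq _ _ hnd hed]
  simp
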